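-- pv_equiv track=rewrite | github.com/FakeYou/advent-of-code | 2015/day-08/solve.py | part2
-- ===== SOURCE A (Python) =====
-- from enum import Enum
--
-- class State(Enum):
--     none = 1
--     char = 2
--     escape = 3
--     hex1 = 4
--     hex2 = 5
--
-- def part1(strings):
--     totalCodeBytes = 0
--     totalStringBytes = 0
--
--     for string in strings:
--         state = State.none
--
--         codeBytes = 0;
--         stringBytes = 0;
--
--         # loop through every character in the string and process it based on the state
--         for char in string:
--             codeBytes += 1
--
--             # state is none for the first character and when a closing '"' is found
--             if state == State.none:
--                 state = State.char
--                 continue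
--
--             # normal character are counted as string bytes unless it is a '"' or '\'
--             if state == State.char:
--                 if char == '"':
--                     state = State.none
--                 elif char == '\\':
--                     state = State.escape
--                 else:
--                     stringBytes += 1
--                 continue
--
--             # when the state is 'escape'
--             if state == State.escape:
--                 # if the escape starts with an 'x' then we have a hex character of two extra bytes
--                 # for example \x27 = "'"
--                 if char == 'x':
--                     state = State.hex1
--                 else:
--                     state = State.char
--                     stringBytes += 1
--                 continue
--
--             # move from the first hex character to the second
--             if state == State.hex1:
--                 state = State.hex2
--                 continue
--
--             # close the hex character and save as 1 string byte
--             if state == State.hex2: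
--                 state = State.char
--                 stringBytes += 1
--                 continue
--
--         totalCodeBytes += codeBytes
--         totalStringBytes += stringBytes
--
--     # return the difference between the amount of code bytes and string bytes
--     return totalCodeBytes - totalStringBytes
--
-- def part2(strings):
--     encodedStrings = []
--
--     for string in strings:
--         encodedString = ''
--
--         # encode special characters and save to new string
--         for char in string:
--             # encode '"' to '\"'
--             if char == '"':
--                 encodedString += '\\"'
--             # encode '\' to '\\'
--             elif char == '\\':
--                 encodedString += '\\\\'
--             else:
--                 encodedString += char
--
--         # surround encoded string with quotes '"'
--         encodedStrings.append('"' + encodedString + '"')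
--
--     # use solution of part 1 to count the difference between code and string bytes
--     return part1(encodedStrings)
-- ===== SOURCE B (Python) =====
-- def part2(strings):
--     # closed form: encoding adds 2 surrounding quotes plus one backslash
--     # for every '"' or '\' in the string
--     return sum(2 + sum(c == '"' or c == '\\' for c in s) for s in strings)
-- ===== Notes on version B (the rewrite author's own statement) =====
-- stated objective: faster
-- what changed: Replaced building an escaped copy of each string and re-decoding it with part1's five-state machine by a closed-form per-string delta 2 + (number of quote/backslash characters), summed in one pass with no intermediate strings.
import Mathlib
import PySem

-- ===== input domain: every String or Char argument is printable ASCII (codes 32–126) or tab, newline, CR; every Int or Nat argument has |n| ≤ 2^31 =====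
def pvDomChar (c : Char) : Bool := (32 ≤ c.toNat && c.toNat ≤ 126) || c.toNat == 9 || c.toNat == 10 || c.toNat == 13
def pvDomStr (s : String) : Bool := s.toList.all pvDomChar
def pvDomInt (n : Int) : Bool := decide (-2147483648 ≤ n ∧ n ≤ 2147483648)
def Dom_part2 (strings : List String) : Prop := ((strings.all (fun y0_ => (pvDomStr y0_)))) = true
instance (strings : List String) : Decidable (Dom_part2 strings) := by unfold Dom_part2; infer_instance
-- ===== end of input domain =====

-- B replaces A's encode-then-state-machine-decode with a direct per-string count
-- (2 + number of '"'/'\' characters), summed in one pass (objective: faster, constant factor).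

-- ===== PORT A =====
inductive PvState
  | none | char | escape | hex1 | hex2
deriving DecidableEq, Repr

-- the body of part1's inner 'for char in string' loop (codeBytes += 1, then the state machine)
def pvStep (st : PvState × Int × Int) (c : Char) : PvState × Int × Int :=
  match st with
  | (s, codeBytes, stringBytes) =>
    let codeBytes := codeBytes + 1
    match s with
    | .none => (.char, codeBytes, stringBytes)
    | .char =>
      if c = '"' then (.none, codeBytes, stringBytes)
      else if c = '\\' then (.escape, codeBytes, stringBytes)
      else (.char, codeBytes, stringBytes + 1)
    | .escape =>
      if c = 'x' then (.hex1, codeBytes, stringBytes)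
      else (.char, codeBytes, stringBytes + 1)
    | .hex1 => (.hex2, codeBytes, stringBytes)
    | .hex2 => (.char, codeBytes, stringBytes + 1)

def part1 (strings : List String) : Int :=
  let totals := strings.foldl
    (fun (t : Int × Int) string =>
      let r := string.toList.foldl pvStep (PvState.none, 0, 0)
      (t.1 + r.2.1, t.2 + r.2.2))
    (0, 0)
  totals.1 - totals.2

-- part2's inner encoding loop (encodedString += …)
def pvEncode (string : String) : String :=
  string.toList.foldl
    (fun encodedString char =>
      if char = '"' then encodedString ++ "\\\""
      else if char = '\\' then encodedString ++ "\\\\"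
      else encodedString ++ String.ofList [char])
    ""

def part2 (strings : List String) : Int :=
  part1 (strings.foldl
    (fun encodedStrings string => encodedStrings ++ ["\"" ++ pvEncode string ++ "\""]) [])

-- ===== PORT B =====
def part2_alt (strings : List String) : Int :=
  (strings.map (fun s =>
    2 + ((s.toList.countP (fun c => c == '"' || c == '\\') : Nat) : Int))).sum

-- ===== PRECONDITION & SPEC =====
def Spec_part2 (strings : List String) (out : Int) : Prop := out = part2_alt strings
instance (strings : List String) (out : Int) : Decidable (Spec_part2 strings out) := by unfold Spec_part2; infer_instance

-- ===== CLAIM (what is proved, stated in full; the proofs are below) =====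
def Claim_equal_part2 : Prop := ∀ (strings : List String), Dom_part2 strings → Spec_part2 strings (part2 strings)

-- ===== LEMMAS AND PROOFS =====

-- what pvEncode emits for one character
def pvEsc (c : Char) : List Char :=
  if c = '"' then ['\\', '"'] else if c = '\\' then ['\\', '\\'] else [c]

theorem pvEncode_fold (cs : List Char) : ∀ acc : String,
    (cs.foldl
      (fun encodedString char =>
        if char = '"' then encodedString ++ "\\\""
        else if char = '\\' then encodedString ++ "\\\\"
        else encodedString ++ String.ofList [char]) acc).toList
      = acc.toList ++ cs.flatMap pvEsc := by
  induction cs with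
  | nil => intro acc; simp
  | cons c cs ih =>
    intro acc
    by_cases h1 : c = '"'
    · simp [h1, ih, pvEsc]
    · by_cases h2 : c = '\\'
      · simp [h1, h2, ih, pvEsc]
      · simp [h1, h2, ih, pvEsc]

theorem pvEncode_toList (s : String) :
    (pvEncode s).toList = s.toList.flatMap pvEsc := by
  simp [pvEncode, pvEncode_fold]

theorem length_flatMap_pvEsc (cs : List Char) :
    (cs.flatMap pvEsc).length
      = cs.length + cs.countP (fun c => c == '"' || c == '\\') := by
  induction cs with
  | nil => simp
  | cons c cs ih =>
    by_cases h1 : c = '"'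
    · simp [h1, pvEsc, ih]; omega
    · by_cases h2 : c = '\\'
      · simp [h1, h2, pvEsc, ih]; omega
      · simp [h1, h2, pvEsc, ih]; omega

-- single steps of the machine
theorem step_none (c : Char) (code strB : Int) :
    pvStep (PvState.none, code, strB) c = (PvState.char, code + 1, strB) := rfl
theorem step_char_quote (code strB : Int) :
    pvStep (PvState.char, code, strB) '"' = (PvState.none, code + 1, strB) := rfl
theorem step_char_backslash (code strB : Int) :
    pvStep (PvState.char, code, strB) '\\' = (PvState.escape, code + 1, strB) := rfl
theorem step_char_other {c : Char} (h1 : ¬ c = '"') (h2 : ¬ c = '\\') (code strB : Int) :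
    pvStep (PvState.char, code, strB) c = (PvState.char, code + 1, strB + 1) := by
  simp [pvStep, h1, h2]
theorem step_escape_quote (code strB : Int) :
    pvStep (PvState.escape, code, strB) '"' = (PvState.char, code + 1, strB + 1) := rfl
theorem step_escape_backslash (code strB : Int) :
    pvStep (PvState.escape, code, strB) '\\' = (PvState.char, code + 1, strB + 1) := rfl

-- the state machine in 'char' state consumes the escaped text, recovering one
-- string byte per original character and staying in 'char' state
theorem run_char (cs : List Char) : ∀ (code strB : Int),
    (cs.flatMap pvEsc).foldl pvStep (PvState.char, code, strB)
      = (PvState.char, code + ((cs.flatMap pvEsc).length : Int), strB + (cs.length : Int)) := by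
  induction cs with
  | nil => intro code strB; simp
  | cons c cs ih =>
    intro code strB
    by_cases h1 : c = '"'
    · have e : pvEsc c = ['\\', '"'] := by simp [pvEsc, h1]
      rw [List.flatMap_cons, e, List.foldl_append]
      simp only [List.foldl_cons, List.foldl_nil, step_char_backslash, step_escape_quote, ih]
      simp only [Prod.mk.injEq, List.length_append, true_and,
        List.length_cons, List.length_nil]
      push_cast
      omega
    · by_cases h2 : c = '\\'
      · have e : pvEsc c = ['\\', '\\'] := by simp [pvEsc, h2]
        rw [List.flatMap_cons, e, List.foldl_append]
        simp only [List.foldl_cons, List.foldl_nil, step_char_backslash,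
          step_escape_backslash, ih]
        simp only [Prod.mk.injEq, List.length_append, true_and,
          List.length_cons, List.length_nil]
        push_cast
        omega
      · have e : pvEsc c = [c] := by simp [pvEsc, h1, h2]
        rw [List.flatMap_cons, e, List.foldl_append]
        simp only [List.foldl_cons, List.foldl_nil, step_char_other h1 h2, ih]
        simp only [Prod.mk.injEq, List.length_append, true_and,
          List.length_cons, List.length_nil]
        push_cast
        omega

-- running the whole machine on '"' ++ escaped ++ '"'
theorem run_string (cs : List Char) :
    (('"' :: (cs.flatMap pvEsc ++ ['"'])).foldl pvStep (PvState.none, 0, 0))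
      = (PvState.none, ((cs.flatMap pvEsc).length : Int) + 2, (cs.length : Int)) := by
  rw [List.foldl_cons, step_none, List.foldl_append, run_char]
  simp only [List.foldl_cons, List.foldl_nil, step_char_quote]
  simp only [Prod.mk.injEq, true_and]
  push_cast
  omega

theorem encoded_toList (s : String) :
    ("\"" ++ pvEncode s ++ "\"").toList = '"' :: (s.toList.flatMap pvEsc ++ ['"']) := by
  simp [pvEncode_toList]

theorem part1_outer (l : List String) : ∀ (a b : Int),
    (l.foldl
      (fun (t : Int × Int) string =>
        let r := string.toList.foldl pvStep (PvState.none, 0, 0)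
        (t.1 + r.2.1, t.2 + r.2.2)) (a, b)).1
    - (l.foldl
      (fun (t : Int × Int) string =>
        let r := string.toList.foldl pvStep (PvState.none, 0, 0)
        (t.1 + r.2.1, t.2 + r.2.2)) (a, b)).2
    = (a - b) + (l.map (fun string =>
        (string.toList.foldl pvStep (PvState.none, 0, 0)).2.1
        - (string.toList.foldl pvStep (PvState.none, 0, 0)).2.2)).sum := by
  induction l with
  | nil => intro a b; simp
  | cons s l ih =>
    intro a b
    simp only [List.foldl_cons, List.map_cons, List.sum_cons]
    rw [ih]
    ring

theorem delta_string (s : String) :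
    (("\"" ++ pvEncode s ++ "\"").toList.foldl pvStep (PvState.none, 0, 0)).2.1
    - (("\"" ++ pvEncode s ++ "\"").toList.foldl pvStep (PvState.none, 0, 0)).2.2
    = 2 + ((s.toList.countP (fun c => c == '"' || c == '\\') : Nat) : Int) := by
  rw [encoded_toList, run_string, length_flatMap_pvEsc]
  push_cast
  ring

-- ===== VERDICT (by name: the statement is the Claim_ definition above) =====
theorem part2_spec : Claim_equal_part2 := by
  intro strings _
  simp only [Spec_part2, part2, part1, part2_alt,
    PySem.List.foldl_append_singleton_eq_map, List.nil_append]
  rw [part1_outer, List.map_map]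
  rw [sub_self, zero_add]
  congr 1
  refine List.map_congr_left ?_
  intro s _
  simp only [Function.comp_apply]
  exact delta_string s
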